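-- pv_equiv track=rewrite | github.com/helenc3/LevelA | project_stock.py | compute_increase
-- ===== SOURCE A (Python) =====
-- def compute_increase(records):
--     index=1
--     la=[]
--     days=0
--     while index<len(records)-1:
--         if records[index-1]<records[index]:
--             days+=1
--             index+=1
--         else:
--             la.append(days)
--             days=0
--             index+=1
--
--     increase={}
--     for i in range(1,16):
--         increase.update({i:la.count(i)})
--
--     return increase
-- ===== SOURCE B (Python) =====
-- def compute_increase(records):
--     flags = [records[i - 1] < records[i] for i in range(1, len(records) - 1)]
--     breaks = [i for i, f in enumerate(flags) if not f]
--     gaps = [b - a - 1 for a, b in zip([-1] + breaks, breaks)]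
--     return {i: gaps.count(i) for i in range(1, 16)}
-- ===== Notes on version B (the rewrite author's own statement) =====
-- stated objective: alternative
-- what changed: Replaces A's stateful while-loop with running day counter by a staged pipeline: build the boolean increase-flags list, collect the positions where the comparison fails, and recover each run length arithmetically as the gap between consecutive break positions (zip of shifted break lists), then count the gaps 1..15.
import Mathlib
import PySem

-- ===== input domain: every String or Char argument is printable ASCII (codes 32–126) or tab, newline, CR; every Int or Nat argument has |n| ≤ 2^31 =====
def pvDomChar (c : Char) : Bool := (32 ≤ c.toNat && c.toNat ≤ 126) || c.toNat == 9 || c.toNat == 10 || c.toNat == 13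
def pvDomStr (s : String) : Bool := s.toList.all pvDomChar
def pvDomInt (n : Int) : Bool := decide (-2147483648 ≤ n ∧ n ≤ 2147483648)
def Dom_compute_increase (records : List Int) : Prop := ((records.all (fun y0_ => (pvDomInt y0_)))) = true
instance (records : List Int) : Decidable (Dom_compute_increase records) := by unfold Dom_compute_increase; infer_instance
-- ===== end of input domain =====

-- B replaces A's stateful scan (running `days` counter, list of finished runs) by a staged
-- pipeline: increase-flags list, break positions, run lengths as gaps between consecutive
-- breaks, then the 1..15 counts (objective: alternative decomposition, same cost).

-- ===== PORT A =====
def compute_increase (records : List Int) : List (Int × Int) :=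
  let st := (PySem.List.pyRange 1 ((records.length : Int) - 1) 1).foldl
    (fun (s : List Int × Int) index =>
      if PySem.List.pyGetD records (index - 1) 0 < PySem.List.pyGetD records index 0
      then (s.1, s.2 + 1)
      else (s.1 ++ [s.2], 0)) ([], 0)
  ((PySem.List.pyRange 1 16 1).foldl
    (fun d i => d.update [(i, (PySem.List.count st.1 i : Int))]) PySem.Dict.empty).items

-- ===== PORT B =====
def compute_increase_alt (records : List Int) : List (Int × Int) :=
  let flags := (PySem.List.pyRange 1 ((records.length : Int) - 1) 1).map
    (fun i => decide (PySem.List.pyGetD records (i - 1) 0 < PySem.List.pyGetD records i 0))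
  let breaks := ((PySem.List.enumerate flags 0).filter (fun p => !p.2)).map (·.1)
  let gaps := (List.zip ((-1) :: breaks) breaks).map (fun p => p.2 - p.1 - 1)
  ((PySem.List.pyRange 1 16 1).foldl
    (fun d i => d.insert i (PySem.List.count gaps i : Int)) PySem.Dict.empty).items

-- ===== PRECONDITION & SPEC =====
def Spec_compute_increase (records : List Int) (out : List (Int × Int)) : Prop := out = compute_increase_alt records
instance (records : List Int) (out : List (Int × Int)) : Decidable (Spec_compute_increase records out) := by unfold Spec_compute_increase; infer_instance

-- ===== CLAIM (what is proved, stated in full; the proofs are below) =====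
def Claim_equal_compute_increase : Prop := ∀ (records : List Int), Dom_compute_increase records → Spec_compute_increase records (compute_increase records)

-- ===== LEMMAS AND PROOFS =====

-- A's loop step, abstracted over the comparison outcome
def stepA (s : List Int × Int) (b : Bool) : List Int × Int :=
  if b then (s.1, s.2 + 1) else (s.1 ++ [s.2], 0)

-- B's break positions of a flags list
def breaksOf (fs : List Bool) : List Int :=
  ((PySem.List.enumerate fs 0).filter (fun p => !p.2)).map (·.1)

-- recursive form of B's gap computation
def gapsAux (p : Int) (bs : List Int) : List Int :=
  match bs with
  | [] => []
  | b :: bs' => (b - p - 1) :: gapsAux b bs'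

lemma zip_gaps (bs : List Int) (p : Int) :
    (List.zip (p :: bs) bs).map (fun q => q.2 - q.1 - 1) = gapsAux p bs := by
  induction bs generalizing p with
  | nil => rfl
  | cons b bs ih => simp [gapsAux, ih b]

lemma gapsAux_append (bs : List Int) (p k : Int) :
    gapsAux p (bs ++ [k]) = gapsAux p bs ++ [k - bs.getLastD p - 1] := by
  induction bs generalizing p with
  | nil => rfl
  | cons b bs ih =>
    show (b - p - 1) :: gapsAux b (bs ++ [k])
        = ((b - p - 1) :: gapsAux b bs) ++ [k - (b :: bs).getLastD p - 1]
    rw [ih b, List.getLastD_cons, List.cons_append]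

lemma getLastD_append_singleton (l : List Int) (a d : Int) :
    (l ++ [a]).getLastD d = a := by
  induction l generalizing d with
  | nil => rfl
  | cons x l ih => rw [List.cons_append, List.getLastD_cons]; exact ih x

lemma stepA_true (s : List Int × Int) : stepA s true = (s.1, s.2 + 1) := rfl

lemma stepA_false (s : List Int × Int) : stepA s false = (s.1 ++ [s.2], 0) := rfl

lemma breaksOf_append_true (fs : List Bool) :
    breaksOf (fs ++ [true]) = breaksOf fs := by
  simp [breaksOf, PySem.List.enumerate_append, List.filter_append,
    PySem.List.enumerate_cons, PySem.List.enumerate_nil]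

lemma breaksOf_append_false (fs : List Bool) :
    breaksOf (fs ++ [false]) = breaksOf fs ++ [(fs.length : Int)] := by
  simp [breaksOf, PySem.List.enumerate_append, List.filter_append,
    PySem.List.enumerate_cons, PySem.List.enumerate_nil]

lemma foldl_stepA (fs : List Bool) :
    fs.foldl stepA ([], 0) =
      (gapsAux (-1) (breaksOf fs), (fs.length : Int) - (breaksOf fs).getLastD (-1) - 1) := by
  induction fs using List.reverseRecOn with
  | nil => simp [breaksOf, gapsAux, PySem.List.enumerate_nil]
  | append_singleton fs b ih =>
    rw [List.foldl_append, List.foldl_cons, List.foldl_nil, ih]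
    cases b with
    | true =>
      rw [stepA_true, breaksOf_append_true, Prod.mk.injEq]
      refine ⟨rfl, ?_⟩
      simp only [List.length_append, List.length_cons, List.length_nil]
      push_cast; ring
    | false =>
      rw [stepA_false, breaksOf_append_false, gapsAux_append,
        getLastD_append_singleton, Prod.mk.injEq]
      refine ⟨rfl, ?_⟩
      simp

-- A's comparison-fold equals stepA over the flags list
lemma foldl_cmp_eq_stepA (records : List Int) :
    (PySem.List.pyRange 1 ((records.length : Int) - 1) 1).foldl
      (fun (s : List Int × Int) index =>
        if PySem.List.pyGetD records (index - 1) 0 < PySem.List.pyGetD records index 0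
        then (s.1, s.2 + 1)
        else (s.1 ++ [s.2], 0)) ([], 0)
    = ((PySem.List.pyRange 1 ((records.length : Int) - 1) 1).map
        (fun i => decide (PySem.List.pyGetD records (i - 1) 0 < PySem.List.pyGetD records i 0))).foldl
        stepA ([], 0) := by
  rw [List.foldl_map]
  have hf : (fun (s : List Int × Int) i =>
      stepA s (decide (PySem.List.pyGetD records (i - 1) 0 < PySem.List.pyGetD records i 0)))
      = (fun (s : List Int × Int) index =>
        if PySem.List.pyGetD records (index - 1) 0 < PySem.List.pyGetD records index 0
        then (s.1, s.2 + 1)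
        else (s.1 ++ [s.2], 0)) := by
    funext s i
    by_cases h : PySem.List.pyGetD records (i - 1) 0 < PySem.List.pyGetD records i 0 <;>
      simp [stepA, h]
  rw [hf]

lemma dict_update_singleton (d : PySem.Dict Int Int) (k v : Int) :
    d.update [(k, v)] = d.insert k v := rfl

-- ===== VERDICT (by name: the statement is the Claim_ definition above) =====
theorem compute_increase_spec : Claim_equal_compute_increase := by
  intro records _
  simp only [Spec_compute_increase, compute_increase, compute_increase_alt]
  rw [foldl_cmp_eq_stepA, foldl_stepA]
  simp only [dict_update_singleton, breaksOf, zip_gaps]
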